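-- pv_equiv track=rewrite | github.com/AbdelrahmanWaelAtef/Encryption-Decryption-using-Hill-Cipher-mod-27 | Functions.py | alpha_num
-- ===== SOURCE A (Python) =====
-- def alpha_num(string):  # turns stream of string characters into a list
--     current_list = []
--     main_list = []
--     string = string.lower()
--     if len(string) % 3 != 0:
--         for i in range(3 - (len(string) % 3)):
--             string = string + ' '
--     for char in string:
--         if char == ' ':
--             current_list.append(26)
--         else:
--             current_list.append(ord(char) - 97)
--         if len(current_list) == 3:
--             main_list.append(current_list)
--             current_list = []
--     return main_list
-- ===== SOURCE B (Python) =====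
-- def alpha_num(string):
--     s = string.lower() + ' ' * ((-len(string)) % 3)
--     codes = [26 if c == ' ' else ord(c) - 97 for c in s]
--     return [codes[i:i + 3] for i in range(0, len(codes), 3)]
-- ===== Notes on version B (the rewrite author's own statement) =====
-- stated objective: simpler
-- what changed: B replaces A's single pass with a running 3-element buffer by a closed-form padding ((-len)%3), one flat comprehension of codes, and a separate slice-based chunking comprehension.
import Mathlib
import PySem

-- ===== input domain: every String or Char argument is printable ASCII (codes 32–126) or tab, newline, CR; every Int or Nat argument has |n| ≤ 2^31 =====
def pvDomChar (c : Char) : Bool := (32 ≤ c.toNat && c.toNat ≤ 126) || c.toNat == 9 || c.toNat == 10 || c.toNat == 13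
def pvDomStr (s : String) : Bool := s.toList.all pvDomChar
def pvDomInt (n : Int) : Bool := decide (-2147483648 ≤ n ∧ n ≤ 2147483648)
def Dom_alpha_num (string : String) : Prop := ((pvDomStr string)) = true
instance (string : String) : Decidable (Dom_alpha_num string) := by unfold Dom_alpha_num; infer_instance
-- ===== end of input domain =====

-- B changes the decomposition (closed-form padding + flat code list + separate slice-chunking pass); same O(n) cost.

-- ===== PORT A =====
-- A's loop body: append the code, flush the buffer when it reaches 3.
def pvStepA (st : List Int × List (List Int)) (code : Int) : List Int × List (List Int) :=
  let cur := st.1 ++ [code]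
  if cur.length = 3 then ([], st.2 ++ [cur]) else (cur, st.2)

-- A: lowercase, pad with spaces while len % 3 != 0, then one pass with a running buffer.
-- (Python strings are ported as their character lists, the PySem convention.)
def alpha_num (string : String) : List (List Int) :=
  let string1 := PySem.Chars.lower string.toList
  let string2 :=
    if PySem.Int.mod (PySem.Chars.len string1) 3 ≠ 0 then
      (PySem.List.pyRange 0 (3 - PySem.Int.mod (PySem.Chars.len string1) 3) 1).foldl
        (fun s _ => s ++ [' ']) string1
    else string1
  let res := string2.foldl
    (fun st char => pvStepA st (if char = ' ' then (26 : Int) else (char.toNat : Int) - 97))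
    ([], [])
  res.2

-- ===== PORT B =====
-- B: lowercase + closed-form padding, flat code list, then [codes[i:i+3] for i in range(0, len(codes), 3)].
def alpha_num_alt (string : String) : List (List Int) :=
  let s := PySem.Chars.lower string.toList ++
    List.replicate (PySem.Int.mod (-(PySem.Chars.len string.toList)) 3).toNat ' '
  let codes := s.map (fun c => if c = ' ' then (26 : Int) else (c.toNat : Int) - 97)
  (PySem.List.pyRange 0 (PySem.List.len codes) 3).map
    (fun i => PySem.List.slice codes (some i) (some (i + 3)))

-- ===== PRECONDITION & SPEC =====
def Spec_alpha_num (string : String) (out : List (List Int)) : Prop := out = alpha_num_alt string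
instance (string : String) (out : List (List Int)) : Decidable (Spec_alpha_num string out) := by unfold Spec_alpha_num; infer_instance

-- ===== CLAIM (what is proved, stated in full; the proofs are below) =====
def Claim_equal_alpha_num : Prop := ∀ (string : String), Dom_alpha_num string → Spec_alpha_num string (alpha_num string)

-- ===== LEMMAS AND PROOFS =====

-- reference chunking: the k-th chunk is codes[3k : 3k+3]
def pvChunksR (K : Nat) (codes : List Int) : List (List Int) :=
  (List.range K).map (fun k => (codes.drop (3 * k)).take 3)

lemma pv_len_lower (l : List Char) : (PySem.Chars.lower l).length = l.length := by
  induction l with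
  | nil => simp [PySem.Chars.lower]
  | cons c t ih => simp [PySem.Chars.lower]

-- A's padding loop appends one space per range element.
lemma pv_pad (r : List Int) (s0 : List Char) :
    r.foldl (fun s _ => s ++ [' ']) s0 = s0 ++ List.replicate r.length ' ' := by
  induction r generalizing s0 with
  | nil => simp
  | cons a t ih =>
    simp only [List.foldl_cons, List.length_cons, List.replicate_succ]
    rw [ih]
    simp

lemma pv_chunksR_succ (K : Nat) (a b c : Int) (rest : List Int) :
    pvChunksR (K + 1) (a :: b :: c :: rest) = [a, b, c] :: pvChunksR K rest := by
  unfold pvChunksR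
  rw [List.range_succ_eq_map, List.map_cons, List.map_map]
  refine congrArg₂ List.cons ?_ ?_
  · rfl
  · apply List.map_congr_left
    intro k hk
    simp only [Function.comp_apply]
    rfl

-- A's buffered loop on a list of codes of length 3K produces exactly the chunks.
lemma pv_loop_chunk (K : Nat) : ∀ (codes : List Int) (main : List (List Int)),
    codes.length = 3 * K →
    codes.foldl pvStepA ([], main) = ([], main ++ pvChunksR K codes) := by
  induction K with
  | zero =>
    intro codes main h
    have hnil : codes = [] := List.eq_nil_of_length_eq_zero (by omega)
    subst hnil
    simp [pvChunksR]
  | succ K ih =>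
    intro codes main h
    rcases codes with _ | ⟨a, _ | ⟨b, _ | ⟨c, rest⟩⟩⟩
    · exfalso; simp only [List.length_nil] at h; omega
    · exfalso; simp only [List.length_cons, List.length_nil] at h; omega
    · exfalso; simp only [List.length_cons, List.length_nil] at h; omega
    · have hr : rest.length = 3 * K := by
        simp only [List.length_cons] at h; omega
      simp only [List.foldl_cons]
      have s1 : pvStepA ([], main) a = ([a], main) := by simp [pvStepA]
      have s2 : pvStepA ([a], main) b = ([a, b], main) := by simp [pvStepA]
      have s3 : pvStepA ([a, b], main) c = ([], main ++ [[a, b, c]]) := by simp [pvStepA]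
      rw [s1, s2, s3, ih rest (main ++ [[a, b, c]]) hr, pv_chunksR_succ]
      simp

-- B's range/slice comprehension is the same chunking.
lemma pv_B_chunks (codes : List Int) (K : Nat) (h : codes.length = 3 * K) :
    (PySem.List.pyRange 0 (PySem.List.len codes) 3).map
      (fun i => PySem.List.slice codes (some i) (some (i + 3))) = pvChunksR K codes := by
  rw [PySem.List.len_eq, h, PySem.List.pyRange_of_pos 0 _ (by norm_num : (0:Int) < 3)]
  have hR : (if (0:Int) < ((3 * K : Nat) : Int)
      then ((((3 * K : Nat) : Int) - 0 + 3 - 1) / 3).toNat else 0) = K := by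
    split_ifs with h0
    · omega
    · omega
  rw [hR, List.map_map]
  unfold pvChunksR
  apply List.map_congr_left
  intro k hk
  simp only [Function.comp_apply]
  have e1 : (0 : Int) + 3 * (k : Int) = ((3 * k : Nat) : Int) := by push_cast; ring
  have e2 : ((3 * k : Nat) : Int) + 3 = ((3 * k : Nat) : Int) + ((3 : Nat) : Int) := by
    push_cast; ring
  rw [e1, e2, PySem.List.slice_natCast_add codes (3 * k) 3]

-- common tail: A's buffered fold over a char list of length 3K = B's chunk comprehension
lemma pv_codes_eq (s : List Char) (K : Nat) (h : s.length = 3 * K) :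
    (s.foldl (fun st char => pvStepA st (if char = ' ' then (26 : Int) else (char.toNat : Int) - 97)) ([], [])).2
    = (PySem.List.pyRange 0 (PySem.List.len (s.map (fun c => if c = ' ' then (26 : Int) else (c.toNat : Int) - 97))) 3).map
        (fun i => PySem.List.slice (s.map (fun c => if c = ' ' then (26 : Int) else (c.toNat : Int) - 97)) (some i) (some (i + 3))) := by
  rw [← List.foldl_map,
      pv_loop_chunk K _ [] (by simpa using h),
      pv_B_chunks _ K (by simpa using h)]
  simp

lemma pv_main_eq (string : String) : alpha_num string = alpha_num_alt string := by
  simp only [alpha_num, alpha_num_alt]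
  have hC1 : PySem.Chars.len (PySem.Chars.lower string.toList) = (string.toList.length : Int) := by
    rw [PySem.Chars.len_eq, pv_len_lower]
  have hC0 : PySem.Chars.len string.toList = (string.toList.length : Int) :=
    PySem.Chars.len_eq _
  rw [hC1, hC0]
  have hmodA : PySem.Int.mod ((string.toList.length : Int)) 3 = ((string.toList.length : Int)) % 3 :=
    PySem.Int.mod_eq_emod_of_pos (by norm_num)
  have hmodB : PySem.Int.mod (-(string.toList.length : Int)) 3 = (-(string.toList.length : Int)) % 3 :=
    PySem.Int.mod_eq_emod_of_pos (by norm_num)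
  rw [hmodA, hmodB]
  set n := string.toList.length with hn
  set p := ((-(n : Int)) % 3).toNat with hp
  by_cases hm : ((n : Int)) % 3 = 0
  · rw [if_neg (not_not_intro hm)]
    have hp0 : p = 0 := by rw [hp]; omega
    rw [hp0, List.replicate_zero, List.append_nil]
    exact pv_codes_eq _ (n / 3) (by rw [pv_len_lower]; omega)
  · rw [if_pos hm, pv_pad, PySem.List.length_pyRange_one]
    have hpe : ((3 - (n : Int) % 3) - 0).toNat = p := by rw [hp]; omega
    rw [hpe]
    refine pv_codes_eq _ ((n + p) / 3) ?_
    rw [List.length_append, pv_len_lower, List.length_replicate]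
    omega

-- ===== VERDICT (by name: the statement is the Claim_ definition above) =====
theorem alpha_num_spec : Claim_equal_alpha_num := by
  intro s _
  exact pv_main_eq s
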